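-- pv_equiv track=rewrite | github.com/dongjuppp/algo_book | test/test13.py | solution
-- ===== SOURCE A (Python) =====
-- def solution(s):
--     answer = 0
--
--     lt=list(map(str,s))
--
--     for i in range(len(lt)):
--         if lt[i]=='a':
--             for j in range(i+1,len(lt)):
--                 if lt[j]=='a':
--                     break
--                 if lt[j]=='z':
--                     answer+=1
--                     break
--         if lt[i]=='z':
--             for j in range(i+1,len(lt)):
--                 if lt[j]=='z':
--                     break
--                 if lt[j]=='a':
--                     answer+=1
--                     break
--     return answer
-- ===== SOURCE B (Python) =====
-- def solution(s):
--     special = [c for c in map(str, s) if c == 'a' or c == 'z']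
--     return sum(p != q for p, q in zip(special, special[1:]))
-- ===== Notes on version B (the rewrite author's own statement) =====
-- stated objective: simpler
-- what changed: Replaces the per-index forward scan (for each 'a'/'z' an inner loop hunting the next special char) with filtering out the 'a'/'z' subsequence once and counting adjacent differing pairs in a single zip pass.
import Mathlib
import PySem

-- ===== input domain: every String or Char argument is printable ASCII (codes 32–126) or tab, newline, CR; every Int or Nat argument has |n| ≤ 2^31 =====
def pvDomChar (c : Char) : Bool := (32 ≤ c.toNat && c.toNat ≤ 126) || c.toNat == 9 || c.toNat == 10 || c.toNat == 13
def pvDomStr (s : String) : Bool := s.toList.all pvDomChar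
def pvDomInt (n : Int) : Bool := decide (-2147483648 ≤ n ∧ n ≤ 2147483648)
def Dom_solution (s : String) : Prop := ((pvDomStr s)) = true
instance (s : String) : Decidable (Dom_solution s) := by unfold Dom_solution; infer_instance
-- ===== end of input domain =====

-- B replaces A's per-index forward scans with "filter the a/z subsequence, count adjacent differing pairs": simpler, one pass.

-- ===== PORT A =====
-- inner loop "for j in range(i+1,len(lt)): if lt[j]==same: break; if lt[j]==diff: answer+=1; break"
-- (ported as the obvious structural recursion over the remaining characters; Python's
-- list(map(str,s)) over a string is the list of its characters, so we compare Chars directly — exact)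
def pvScanA : List Char → Char → Char → Int
  | [], _, _ => 0
  | c :: r, same, diff =>
      if c = same then 0
      else if c = diff then 1
      else pvScanA r same diff

-- outer loop "for i in range(len(lt)): …", each index contributing via lt[i] and lt[i+1:]
def pvOuterA : List Char → Int
  | [] => 0
  | c :: t =>
      ((if c = 'a' then pvScanA t 'a' 'z' else 0)
        + (if c = 'z' then pvScanA t 'z' 'a' else 0)) + pvOuterA t

def solution (s : String) : Int := pvOuterA s.toList

-- ===== PORT B =====
def solution_alt (s : String) : Int :=
  let special := s.toList.filter (fun c => c == 'a' || c == 'z')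
  Int.ofNat ((special.zip (special.drop 1)).countP (fun pq => pq.1 != pq.2))

-- ===== PRECONDITION & SPEC =====
def Spec_solution (s : String) (out : Int) : Prop := out = solution_alt s
instance (s : String) (out : Int) : Decidable (Spec_solution s out) := by unfold Spec_solution; infer_instance

-- ===== CLAIM (what is proved, stated in full; the proofs are below) =====
def Claim_equal_solution : Prop := ∀ (s : String), Dom_solution s → Spec_solution s (solution s)

-- ===== LEMMAS AND PROOFS =====

-- B's pair count, abbreviated
def pvG (fl : List Char) : Int :=
  Int.ofNat ((fl.zip (fl.drop 1)).countP (fun pq => pq.1 != pq.2))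

theorem pvG_cons (c : Char) (fl : List Char) :
    pvG (c :: fl)
      = (match fl.head? with
         | some b => if c ≠ b then (1 : Int) else 0
         | none => 0) + pvG fl := by
  cases fl with
  | nil => simp [pvG]
  | cons b r =>
      simp only [pvG, List.drop, List.head?, List.zip_cons_cons, List.countP_cons]
      by_cases h : c = b <;> simp [h, bne] <;> omega

-- A's inner scan returns 1 exactly when the first special char ahead is the other one
theorem pvScanA_a (t : List Char) :
    pvScanA t 'a' 'z'
      = if (t.filter (fun c => c == 'a' || c == 'z')).head? = some 'z' then 1 else 0 := by
  induction t with
  | nil => simp [pvScanA]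
  | cons c r ih =>
      by_cases ha : c = 'a'
      · simp [pvScanA, ha, List.filter]
      · by_cases hz : c = 'z'
        · simp [pvScanA, ha, hz, List.filter]
        · have hcb : (c == 'a' || c == 'z') = false := by simp [ha, hz]
          simp [pvScanA, ha, hz, List.filter, hcb, ih]

theorem pvScanA_z (t : List Char) :
    pvScanA t 'z' 'a'
      = if (t.filter (fun c => c == 'a' || c == 'z')).head? = some 'a' then 1 else 0 := by
  induction t with
  | nil => simp [pvScanA]
  | cons c r ih =>
      by_cases hz : c = 'z'
      · simp [pvScanA, hz, List.filter]
      · by_cases ha : c = 'a'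
        · simp [pvScanA, ha, hz, List.filter]
        · have hcb : (c == 'a' || c == 'z') = false := by simp [ha, hz]
          simp [pvScanA, ha, hz, List.filter, hcb, ih]

theorem pv_main (l : List Char) :
    pvOuterA l = pvG (l.filter (fun c => c == 'a' || c == 'z')) := by
  induction l with
  | nil => simp [pvOuterA, pvG]
  | cons c t ih =>
      by_cases ha : c = 'a'
      · -- head is 'a'
        have hfa : ('a' : Char) ≠ 'z' := by decide
        simp only [pvOuterA, ha, if_pos rfl, pvScanA_a, ih]
        have : (List.filter (fun c => c == 'a' || c == 'z') ('a' :: t))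
            = 'a' :: t.filter (fun c => c == 'a' || c == 'z') := by simp [List.filter]
        rw [this, pvG_cons]
        rcases hh : (t.filter (fun c => c == 'a' || c == 'z')).head? with _ | b
        · simp [hh]
        · have hb : b = 'a' ∨ b = 'z' := by
            have hmem : b ∈ t.filter (fun c => c == 'a' || c == 'z') :=
              List.mem_of_mem_head? hh
            have := List.of_mem_filter hmem
            simp at this
            tauto
          rcases hb with hb | hb <;> simp [hh, hb]
      · by_cases hz : c = 'z'
        · simp only [pvOuterA, hz, if_neg (by decide : ('z':Char) ≠ 'a'), if_pos rfl,
            pvScanA_z, ih]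
          have : (List.filter (fun c => c == 'a' || c == 'z') ('z' :: t))
              = 'z' :: t.filter (fun c => c == 'a' || c == 'z') := by simp [List.filter]
          rw [this, pvG_cons]
          rcases hh : (t.filter (fun c => c == 'a' || c == 'z')).head? with _ | b
          · simp [hh]
          · have hb : b = 'a' ∨ b = 'z' := by
              have hmem : b ∈ t.filter (fun c => c == 'a' || c == 'z') :=
                List.mem_of_mem_head? hh
              have := List.of_mem_filter hmem
              simp at this
              tauto
            rcases hb with hb | hb <;> simp [hh, hb]
        · have hcb : (c == 'a' || c == 'z') = false := by simp [ha, hz]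
          simp [pvOuterA, ha, hz, ih, List.filter, hcb]

-- ===== VERDICT (by name: the statement is the Claim_ definition above) =====
theorem solution_spec : Claim_equal_solution := by
  intro s _
  unfold Spec_solution solution solution_alt
  simpa [pvG] using pv_main s.toList
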